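-- pv_equiv track=rewrite | github.com/simple0710/BOJ | gold/[2482] 색상환.py | solution
-- ===== SOURCE A (Python) =====
-- def solution(N, K):
--   dp = [[0] * (K+1) for _ in range(N+1)]
--   for i in range(N+1):
--     # i개의 색 중에 0개를 선택하는 경우 : 1
--     dp[i][0] = 1
--     # i개의 색 중에 1개를 선택하는 경우 : i
--     dp[i][1] = i
--     if i >= 2:
--       for j in range(2, K+1):
--         if i == N: # 원형이므로 처음 색과 닿는 위치
--           # 주변 색을 포함시키지 않고 j개의 색을 선택하는 경우의 수
--           # i번째 색을 포함시키지 않고 j개의 색을 선택하는 경우의 수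
--           dp[i][j] = dp[i-3][j-1] + dp[i-1][j]
--         else:
--           # i번째 색을 포함시키고, i-1을 제외한 j개의 색을 선택하는 경우의 수
--           # i번째 색을 포함시키지 않고 j개의 색을 선택하는 경우의 수
--           dp[i][j] = dp[i-2][j-1] + dp[i-1][j]
--         dp[i][j] %= int(1e9)+3
--   return dp[N][K] # N가지 색을 인접하지 않도록 K개의 색을 선택하는 경우의 수 반환
-- ===== SOURCE B (Python) =====
-- def solution(N, K):
--   # closed form for circular non-adjacent selection:
--   # C(N-K, K) + C(N-K-1, K-1), reduced mod 1e9+3 (A reduces only for K >= 2)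
--   if K == 1:
--     return N
--   return (_binom(N - K, K) + _binom(N - K - 1, K - 1)) % (int(1e9) + 3)
--
-- def _binom(n, k):
--   if k < 0 or k > n:
--     return 0
--   r = 1
--   for i in range(k):
--     r = r * (n - i) // (i + 1)
--   return r
-- ===== Notes on version B (the rewrite author's own statement) =====
-- stated objective: faster
-- what changed: replaces the O(N*K) circular DP table with the closed-form count C(N-K,K)+C(N-K-1,K-1) computed by an O(K) exact integer product, then reduced mod 1e9+3
-- intended difference: for N=2 and K>=2, A's dp[-1] negative-index wraparound makes it return 2, but choosing K>=2 pairwise non-adjacent colors on a 2-cycle is impossible, so B returns the intended 0 — e.g. on solution(2, 2): A returns 2, B returns 0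
import Mathlib
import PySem

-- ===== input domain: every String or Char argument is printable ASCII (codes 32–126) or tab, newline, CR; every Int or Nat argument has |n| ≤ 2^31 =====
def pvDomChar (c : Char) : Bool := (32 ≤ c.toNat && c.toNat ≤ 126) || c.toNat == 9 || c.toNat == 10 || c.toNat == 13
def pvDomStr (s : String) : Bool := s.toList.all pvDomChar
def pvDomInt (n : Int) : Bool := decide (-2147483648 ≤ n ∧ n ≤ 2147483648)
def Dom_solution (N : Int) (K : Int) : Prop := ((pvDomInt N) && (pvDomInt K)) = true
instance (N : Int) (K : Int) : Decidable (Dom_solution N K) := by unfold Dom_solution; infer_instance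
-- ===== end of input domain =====

-- B replaces A's O(N*K) circular DP table with the closed form C(N-K,K)+C(N-K-1,K-1)
-- computed by an exact integer product (O(K)); for N = 2, K >= 2 A's dp[-1] wraparound
-- returns 2 where B returns the intended 0 (see D_solution).


-- ===== PORT A =====
-- hand-port of Python's xs[i] on an array: negative i counts from the end, none = IndexError
-- (exact for every i: out-of-range stays none via the 0 ≤ k guard and getElem?)
def pvAGet {alpha : Type} (xs : Array alpha) (i : Int) : Option alpha :=
  let k := if i < 0 then i + xs.size else i
  if 0 ≤ k then xs[k.toNat]? else none

-- dp[i][j] read with Python indexing (negative wraps); the `.getD 0` default is never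
-- reached on inputs admitted by Pre_solution (every read is in range, incl. the -1 wrap).
def pvGet2 (dp : Array (Array Int)) (i j : Int) : Int :=
  (((pvAGet dp i).bind fun row => pvAGet row j)).getD 0

-- dp[i][j] = v (writes in A always use in-range non-negative indices)
def pvSet2 (dp : Array (Array Int)) (i j : Nat) (v : Int) : Array (Array Int) :=
  dp.modify i (fun row => row.setIfInBounds j v)

-- body of A's inner `for j in range(2, K+1)` loop: the assignment, then `dp[i][j] %= int(1e9)+3`
def pvInner (N : Int) (i : Int) (dp : Array (Array Int)) (j : Int) : Array (Array Int) :=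
  let v := if i = N then pvGet2 dp (i-3) (j-1) + pvGet2 dp (i-1) j
           else pvGet2 dp (i-2) (j-1) + pvGet2 dp (i-1) j
  let dp1 := pvSet2 dp i.toNat j.toNat v
  pvSet2 dp1 i.toNat j.toNat (PySem.Int.mod (pvGet2 dp1 i j) 1000000003)

-- body of A's outer `for i in range(N+1)` loop
def pvOuter (N : Int) (K : Int) (dp : Array (Array Int)) (i : Int) : Array (Array Int) :=
  let dp1 := pvSet2 dp i.toNat 0 1
  let dp2 := pvSet2 dp1 i.toNat 1 i
  if 2 ≤ i then (PySem.List.pyRange 2 (K+1) 1).foldl (pvInner N i) dp2 else dp2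

def solution (N : Int) (K : Int) : Int :=
  let dp0 := Array.replicate (N+1).toNat (Array.replicate (K+1).toNat 0)
  pvGet2 ((PySem.List.pyRange 0 (N+1) 1).foldl (pvOuter N K) dp0) N K

-- ===== PORT B =====
-- B's _binom: exact multiplicative binomial coefficient
def pvBinom (n : Int) (k : Int) : Int :=
  if k < 0 ∨ n < k then 0
  else (PySem.List.pyRange 0 k 1).foldl
    (fun r i => PySem.Int.floordiv (r * (n - i)) (i + 1)) 1

def solution_alt (N : Int) (K : Int) : Int :=
  if K = 1 then N
  else PySem.Int.mod (pvBinom (N - K) K + pvBinom (N - K - 1) (K - 1)) 1000000003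

-- ===== PRECONDITION & SPEC =====
-- A raises IndexError for N < 0 (empty dp, dp[N] fails) and for K < 1 (dp rows too short
-- for dp[i][1] = i); exactly those inputs are excluded.
def Pre_solution (N : Int) (K : Int) : Prop := 0 ≤ N ∧ 1 ≤ K
instance (N : Int) (K : Int) : Decidable (Pre_solution N K) := by unfold Pre_solution; infer_instance
def pvWitness_solution : Int × Int := (7, 3)

-- For N = 2 and K ≥ 2, A's dp[-1] negative-index wraparound makes it return 2, but choosing
-- K ≥ 2 pairwise non-adjacent colors on a 2-cycle is impossible, so B returns the intended 0.
def D_solution (N : Int) (K : Int) : Prop := N = 2 ∧ 2 ≤ K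
instance (N : Int) (K : Int) : Decidable (D_solution N K) := by unfold D_solution; infer_instance

def Spec_solution (N : Int) (K : Int) (out : Int) : Prop := ¬ D_solution N K → out = solution_alt N K
instance (N : Int) (K : Int) (out : Int) : Decidable (Spec_solution N K out) := by unfold Spec_solution; infer_instance

def pvDiffWitness_solution : Int × Int := (2, 2)
def pvDiffWitnessOut_solution : Int × Int := (2, 0)

-- ===== CLAIM (what is proved, stated in full; the proofs are below) =====
def Claim_unchanged_solution : Prop := ∀ (N : Int) (K : Int), Dom_solution N K → Pre_solution N K → Spec_solution N K (solution N K)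
def Claim_changed_solution : Prop := Dom_solution (pvDiffWitness_solution.1) (pvDiffWitness_solution.2) ∧ Pre_solution (pvDiffWitness_solution.1) (pvDiffWitness_solution.2) ∧ D_solution (pvDiffWitness_solution.1) (pvDiffWitness_solution.2) ∧ solution (pvDiffWitness_solution.1) (pvDiffWitness_solution.2) = pvDiffWitnessOut_solution.1 ∧ solution_alt (pvDiffWitness_solution.1) (pvDiffWitness_solution.2) = pvDiffWitnessOut_solution.2 ∧ pvDiffWitnessOut_solution.1 ≠ pvDiffWitnessOut_solution.2
def Claim_exact_solution : Prop := ∀ (N : Int) (K : Int), Dom_solution N K → Pre_solution N K → D_solution N K → solution N K ≠ solution_alt N K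

-- ===== LEMMAS AND PROOFS =====

-- proof-side machinery: grids of values indexed by (row, col)

def pvLin (i j : Nat) : Int := ((i + 1 - j).choose j : Int)

-- intended value of dp[i][j] in A's table (for inputs outside D_solution)
def pvCell (N : Int) (i j : Nat) : Int :=
  if j = 0 then 1
  else if j = 1 then (i : Int)
  else if i < 2 then 0
  else if (i : Int) = N then (pvLin (i-3) (j-1) + pvLin (i-1) j) % 1000000003
  else pvLin i j % 1000000003

def pvGrid (rows cols : Nat) (f : Nat → Nat → Int) : Array (Array Int) :=
  (Array.range rows).map (fun a => (Array.range cols).map (f a))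

-- row m in progress: columns 0,1 written, inner loop done up to (not incl.) jd
def pvMid (N : Int) (m jd : Nat) (a b : Nat) : Int :=
  if a < m then pvCell N a b
  else if a = m then (if b = 0 then 1 else if b = 1 then (a:Int) else if b < jd then pvCell N a b else 0)
  else 0

def pvDone (N : Int) (m : Nat) (a b : Nat) : Int := if a < m then pvCell N a b else 0

lemma pvGrid_congr {rows cols : Nat} {f g : Nat → Nat → Int}
    (h : ∀ a, a < rows → ∀ b, b < cols → f a b = g a b) :
    pvGrid rows cols f = pvGrid rows cols g := by
  unfold pvGrid
  apply Array.ext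
  · simp
  · intro a ha1 ha2
    simp only [Array.size_map, Array.size_range] at ha1
    simp only [Array.getElem_map, Array.getElem_range]
    apply Array.ext
    · simp
    · intro b hb1 hb2
      simp only [Array.size_map, Array.size_range] at hb1
      simp only [Array.getElem_map, Array.getElem_range]
      exact h a ha1 b hb1

lemma pvAGet_grid_row {rows cols : Nat} {f : Nat → Nat → Int} {i : Int}
    (hi0 : 0 ≤ i) (hi : i < rows) :
    pvAGet (pvGrid rows cols f) i = some ((Array.range cols).map (f i.toNat)) := by
  have hi' : i.toNat < rows := by omega
  unfold pvAGet pvGrid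
  simp only []
  rw [if_neg (by omega : ¬ i < 0), if_pos hi0]
  have hsz : i.toNat < ((Array.range rows).map
      (fun a => (Array.range cols).map (f a))).size := by
    simp only [Array.size_map, Array.size_range]; exact hi'
  rw [Array.getElem?_eq_getElem hsz, Array.getElem_map, Array.getElem_range]

lemma pvAGet_row {cols : Nat} {g : Nat → Int} {j : Int}
    (hj0 : 0 ≤ j) (hj : j < cols) :
    pvAGet ((Array.range cols).map g) j = some (g j.toNat) := by
  have hj' : j.toNat < cols := by omega
  unfold pvAGet
  simp only []
  rw [if_neg (by omega : ¬ j < 0), if_pos hj0]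
  have hsz : j.toNat < ((Array.range cols).map g).size := by
    simp only [Array.size_map, Array.size_range]; exact hj'
  rw [Array.getElem?_eq_getElem hsz, Array.getElem_map, Array.getElem_range]

lemma pvGet2_grid {rows cols : Nat} {f : Nat → Nat → Int} {i j : Int}
    (hi0 : 0 ≤ i) (hi : i < rows) (hj0 : 0 ≤ j) (hj : j < cols) :
    pvGet2 (pvGrid rows cols f) i j = f i.toNat j.toNat := by
  unfold pvGet2
  rw [pvAGet_grid_row hi0 hi, Option.bind_some, pvAGet_row hj0 hj]
  rfl

lemma pvSet2_grid {rows cols : Nat} {f : Nat → Nat → Int} {i j : Nat} (v : Int)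
    (hi : i < rows) (_hj : j < cols) :
    pvSet2 (pvGrid rows cols f) i j v
      = pvGrid rows cols (fun a b => if a = i ∧ b = j then v else f a b) := by
  unfold pvSet2 pvGrid
  apply Array.ext
  · simp
  · intro a ha1 ha2
    simp only [Array.size_modify, Array.size_map, Array.size_range] at ha1
    simp only [Array.getElem_modify, Array.getElem_map, Array.getElem_range]
    by_cases hai : i = a
    · rw [if_pos hai]
      apply Array.ext
      · simp
      · intro b hb1 hb2
        simp only [Array.size_setIfInBounds, Array.size_map, Array.size_range] at hb1
        have hbsz : b < ((Array.range cols).map (f a)).size := by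
          simp only [Array.size_map, Array.size_range]; exact hb1
        rw [Array.getElem_setIfInBounds hbsz]
        simp only [Array.getElem_map, Array.getElem_range]
        by_cases hbj : j = b
        · rw [if_pos hbj, if_pos ⟨hai.symm, hbj.symm⟩]
        · rw [if_neg hbj, if_neg (by tauto)]
    · rw [if_neg hai]
      apply Array.ext
      · simp
      · intro b hb1 hb2
        simp only [Array.size_map, Array.size_range] at hb1
        simp only [Array.getElem_map, Array.getElem_range]
        rw [if_neg (by tauto)]

-- dp value ≡ the line count pvLin, mod 1e9+3, for every cell A reads
lemma pvLin_small {a b : Nat} (ha : a < 2) (hb : 2 ≤ b) : pvLin a b = 0 := by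
  unfold pvLin
  have : a + 1 - b = 0 := by omega
  rw [this]
  have : Nat.choose 0 b = 0 := Nat.choose_eq_zero_of_lt (by omega)
  simp [this]

lemma pvCell_zero (N : Int) (a : Nat) : pvCell N a 0 = 1 := rfl

lemma pvCell_one (N : Int) (a : Nat) : pvCell N a 1 = (a : Int) := rfl

lemma pvCell_small {N : Int} {a b : Nat} (ha : a < 2) (hb : 2 ≤ b) : pvCell N a b = 0 := by
  unfold pvCell
  rw [if_neg (by omega), if_neg (by omega), if_pos ha]

lemma pvCell_mod {N : Int} {a b : Nat} (hb : 1 ≤ b) (hne : (a:Int) ≠ N) :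
    pvCell N a b % 1000000003 = pvLin a b % 1000000003 := by
  unfold pvCell
  rcases Nat.eq_or_lt_of_le hb with h1 | h2
  · have hb1 : b = 1 := h1.symm
    subst hb1
    rw [if_neg (by omega : ¬ (1 = 0)), if_pos rfl]
    unfold pvLin
    have e : 1 + 1 - 1 = 1 := by omega
    rw [show a + 1 - 1 = a from by omega, Nat.choose_one_right]
  · have hb0 : ¬ (b = 0) := by omega
    have hb1 : ¬ (b = 1) := by omega
    simp only [if_neg hb0, if_neg hb1, if_neg hne]
    by_cases ha : a < 2
    · rw [if_pos ha, pvLin_small ha h2]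
    · rw [if_neg ha, Int.emod_emod_of_dvd _ dvd_rfl]

-- Pascal's rule for the line count, in the exact truncated form the DP uses
lemma pvLin_pascal {i j : Nat} (hi : 2 ≤ i) (hj : 2 ≤ j) :
    pvLin i j = pvLin (i-2) (j-1) + pvLin (i-1) j := by
  unfold pvLin
  by_cases h : j ≤ i
  · obtain ⟨j', rfl⟩ : ∃ j', j = j' + 1 := ⟨j - 1, by omega⟩
    have e1 : i + 1 - (j' + 1) = (i - (j' + 1)) + 1 := by omega
    have e2 : i - 2 + 1 - (j' + 1 - 1) = i - (j' + 1) := by omega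
    have e3 : i - 1 + 1 - (j' + 1) = i - (j' + 1) := by omega
    rw [e1, e2, e3, Nat.choose_succ_succ (i - (j' + 1)) j']
    have e4 : j' + 1 - 1 = j' := by omega
    rw [e4]
    push_cast
    ring
  · have e1 : Nat.choose (i + 1 - j) j = 0 := by
      apply Nat.choose_eq_zero_of_lt; omega
    have e2 : Nat.choose (i - 2 + 1 - (j-1)) (j-1) = 0 := by
      apply Nat.choose_eq_zero_of_lt; omega
    have e3 : Nat.choose (i - 1 + 1 - j) j = 0 := by
      apply Nat.choose_eq_zero_of_lt; omega
    rw [e1, e2, e3]; simp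

-- the DP recurrence step, stated on cell values
lemma pvCell_step {N : Int} {m j : Nat} (hm : 2 ≤ m) (hj : 2 ≤ j) (hmN : (m:Int) ≤ N)
    (hsafe : (m:Int) = N → 3 ≤ m) :
    pvCell N m j
      = (if (m:Int) = N then pvCell N (m-3) (j-1) + pvCell N (m-1) j
         else pvCell N (m-2) (j-1) + pvCell N (m-1) j) % 1000000003 := by
  have hb1 : 1 ≤ j - 1 := by omega
  have hcm : pvCell N m j = (if (m:Int) = N then (pvLin (m-3) (j-1) + pvLin (m-1) j) % 1000000003
      else pvLin m j % 1000000003) := by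
    unfold pvCell
    rw [if_neg (by omega : ¬ (j = 0)), if_neg (by omega : ¬ (j = 1)), if_neg (by omega : ¬ (m < 2))]
  rw [hcm]
  by_cases hN : (m:Int) = N
  · have h3 : 3 ≤ m := hsafe hN
    rw [if_pos hN, if_pos hN]
    have hne1 : ((m-3 : Nat):Int) ≠ N := by rw [← hN]; omega
    have hne2 : ((m-1 : Nat):Int) ≠ N := by rw [← hN]; omega
    rw [Int.add_emod (pvCell N (m-3) (j-1)), pvCell_mod hb1 hne1, pvCell_mod (by omega) hne2,
        ← Int.add_emod]
  · rw [if_neg hN, if_neg hN]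
    have hne1 : ((m-2 : Nat):Int) ≠ N := by omega
    have hne2 : ((m-1 : Nat):Int) ≠ N := by omega
    rw [pvLin_pascal hm hj]
    rw [Int.add_emod (pvCell N (m-2) (j-1)), pvCell_mod hb1 hne1, pvCell_mod (by omega) hne2,
        ← Int.add_emod]

-- one iteration of the inner loop, outside the wraparound case
lemma pvInner_step {N K : Int} {rows m j : Nat}
    (hm : 2 ≤ m) (hmr : m < rows) (hmN : (m:Int) ≤ N) (hsafe : (m:Int) = N → 3 ≤ m)
    (hj : 2 ≤ j) (hjK : (j:Int) ≤ K) :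
    pvInner N (m:Int) (pvGrid rows (K+1).toNat (pvMid N m j)) (j:Int)
      = pvGrid rows (K+1).toNat (pvMid N m (j+1)) := by
  have hcols : j < (K+1).toNat := by omega
  have hread : ∀ (a b : Nat), a < m → b < (K+1).toNat →
      pvMid N m j a b = pvCell N a b := by
    intro a b ha _; unfold pvMid; rw [if_pos ha]
  unfold pvInner
  simp only []
  have hv : (if (m:Int) = N
        then pvGet2 (pvGrid rows (K+1).toNat (pvMid N m j)) ((m:Int)-3) ((j:Int)-1)
              + pvGet2 (pvGrid rows (K+1).toNat (pvMid N m j)) ((m:Int)-1) (j:Int)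
        else pvGet2 (pvGrid rows (K+1).toNat (pvMid N m j)) ((m:Int)-2) ((j:Int)-1)
              + pvGet2 (pvGrid rows (K+1).toNat (pvMid N m j)) ((m:Int)-1) (j:Int))
      = (if (m:Int) = N then pvCell N (m-3) (j-1) + pvCell N (m-1) j
         else pvCell N (m-2) (j-1) + pvCell N (m-1) j) := by
    by_cases hN : (m:Int) = N
    · have h3 : 3 ≤ m := hsafe hN
      rw [if_pos hN, if_pos hN]
      rw [pvGet2_grid (by omega) (by omega) (by omega) (by omega),
          pvGet2_grid (by omega) (by omega) (by omega) (by omega)]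
      have e1 : ((m:Int) - 3).toNat = m - 3 := by omega
      have e2 : ((j:Int) - 1).toNat = j - 1 := by omega
      have e3 : ((m:Int) - 1).toNat = m - 1 := by omega
      have e4 : ((j:Int)).toNat = j := by omega
      rw [e1, e2, e3, e4, hread _ _ (by omega) (by omega), hread _ _ (by omega) (by omega)]
    · rw [if_neg hN, if_neg hN]
      rw [pvGet2_grid (by omega) (by omega) (by omega) (by omega),
          pvGet2_grid (by omega) (by omega) (by omega) (by omega)]
      have e1 : ((m:Int) - 2).toNat = m - 2 := by omega
      have e2 : ((j:Int) - 1).toNat = j - 1 := by omega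
      have e3 : ((m:Int) - 1).toNat = m - 1 := by omega
      have e4 : ((j:Int)).toNat = j := by omega
      rw [e1, e2, e3, e4, hread _ _ (by omega) (by omega), hread _ _ (by omega) (by omega)]
  rw [hv]
  have em : ((m:Int)).toNat = m := Int.toNat_natCast m
  have ej : ((j:Int)).toNat = j := Int.toNat_natCast j
  rw [em, ej]
  set v : Int := (if (m:Int) = N then pvCell N (m-3) (j-1) + pvCell N (m-1) j
         else pvCell N (m-2) (j-1) + pvCell N (m-1) j) with hvdef
  rw [pvSet2_grid v hmr hcols]
  have hget : pvGet2 (pvGrid rows (K+1).toNat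
      (fun a b => if a = m ∧ b = j then v else pvMid N m j a b)) ((m:Int)) ((j:Int)) = v := by
    rw [pvGet2_grid (by omega) (by exact_mod_cast hmr) (by omega) (by exact_mod_cast hcols)]
    rw [em, ej]
    simp
  rw [hget]
  rw [pvSet2_grid _ hmr hcols]
  apply pvGrid_congr
  intro a ha b hb
  by_cases hab : a = m ∧ b = j
  · rw [if_pos hab, hab.1, hab.2]
    rw [PySem.Int.mod_eq_emod_of_pos (by norm_num)]
    have hrhs : pvMid N m (j+1) m j = pvCell N m j := by
      unfold pvMid
      rw [if_neg (by omega), if_pos rfl, if_neg (by omega), if_neg (by omega), if_pos (by omega)]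
    rw [hrhs, hvdef]
    exact (pvCell_step hm hj hmN hsafe).symm
  · rw [if_neg hab, if_neg hab]
    unfold pvMid
    by_cases h1 : a < m
    · rw [if_pos h1, if_pos h1]
    · rw [if_neg h1, if_neg h1]
      by_cases h2 : a = m
      · rw [if_pos h2, if_pos h2]
        by_cases h3 : b = 0
        · rw [if_pos h3, if_pos h3]
        · rw [if_neg h3, if_neg h3]
          by_cases h4 : b = 1
          · rw [if_pos h4, if_pos h4]
          · rw [if_neg h4, if_neg h4]
            have hbj : ¬ (b = j) := fun h => hab ⟨h2, h⟩
            by_cases h5 : b < j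
            · rw [if_pos h5, if_pos (by omega)]
            · rw [if_neg h5, if_neg (by omega)]
      · rw [if_neg h2, if_neg h2]

-- the whole inner loop, outside the wraparound case
lemma pvInner_fold {N K : Int} {rows m : Nat}
    (hm : 2 ≤ m) (hmr : m < rows) (hmN : (m:Int) ≤ N) (hsafe : (m:Int) = N → 3 ≤ m) :
    ∀ n : Nat, (2 + n : Int) ≤ K + 1 →
    (PySem.List.pyRange 2 (2 + n)).foldl (pvInner N (m:Int)) (pvGrid rows (K+1).toNat (pvMid N m 2))
      = pvGrid rows (K+1).toNat (pvMid N m (2 + n)) := by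
  intro n
  induction n with
  | zero =>
    intro _
    simp
  | succ k ih =>
    intro hk
    push_cast at hk ⊢
    rw [show (2 + ((k:Int) + 1)) = (2 + (k:Int)) + 1 from by ring,
        PySem.List.pyRange_one_succ_right (by omega), List.foldl_append,
        ih (by omega)]
    have hstep := pvInner_step (N := N) (K := K) (rows := rows) hm hmr hmN hsafe
      (j := 2 + k) (by omega) (by push_cast; omega)
    rw [show ((2 + k : Nat) : Int) = 2 + (k:Int) from by push_cast; ring] at hstep
    simp only [List.foldl_cons, List.foldl_nil]
    rw [hstep]
    rfl

-- one outer-loop iteration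
lemma pvOuter_step {N K : Int} {m : Nat}
    (hK : 1 ≤ K) (hmr : m < (N+1).toNat) (hmN : (m:Int) ≤ N)
    (hsafe : 2 ≤ m → (m:Int) = N → 2 ≤ K → 3 ≤ m) :
    pvOuter N K (pvGrid (N+1).toNat (K+1).toNat (pvDone N m)) (m:Int)
      = pvGrid (N+1).toNat (K+1).toNat (pvDone N (m+1)) := by
  have hcols1 : 1 < (K+1).toNat := by omega
  have hcols0 : 0 < (K+1).toNat := by omega
  unfold pvOuter
  simp only []
  rw [Int.toNat_natCast]
  rw [pvSet2_grid _ hmr hcols0, pvSet2_grid _ hmr hcols1]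
  have hmid : (fun a b => if a = m ∧ b = 1 then (m:Int)
        else if a = m ∧ b = 0 then 1 else pvDone N m a b)
      = pvMid N m 2 := by
    funext a b
    unfold pvMid pvDone
    split_ifs <;> first | rfl | omega
  rw [hmid]
  have hfin : pvGrid (N+1).toNat (K+1).toNat (pvMid N m (K+1).toNat)
      = pvGrid (N+1).toNat (K+1).toNat (pvDone N (m+1)) := by
    apply pvGrid_congr
    intro a ha b hb
    unfold pvMid pvDone
    split_ifs <;> first | rfl | omega | (rw [pvCell_small (by omega) (by omega)]) | simp_all [pvCell_zero, pvCell_one]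
  by_cases h2m : 2 ≤ (m:Int)
  · rw [if_pos h2m]
    have hm2 : 2 ≤ m := by omega
    by_cases hK2 : 2 ≤ K
    · have hsafe' : (m:Int) = N → 3 ≤ m := fun h => hsafe hm2 h hK2
      have := pvInner_fold (N := N) (K := K) (rows := (N+1).toNat)
        hm2 hmr hmN hsafe' (K - 1).toNat (by omega)
      rw [show (2 + ((K-1).toNat : Int)) = K + 1 from by omega] at this
      rw [this, show 2 + (K-1).toNat = (K+1).toNat from by omega]
      exact hfin
    · have hK1 : K = 1 := by omega
      subst hK1
      rw [show PySem.List.pyRange 2 (1+1) = [] from by norm_num [PySem.List.pyRange_one]]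
      rw [List.foldl_nil]
      rw [show ((1:Int)+1).toNat = 2 from by decide] at hfin ⊢
      exact hfin
  · rw [if_neg h2m]
    have hm2 : m < 2 := by omega
    rw [← hfin]
    apply pvGrid_congr
    intro a ha b hb
    unfold pvMid
    split_ifs <;> first | rfl | omega | (rw [pvCell_small (by omega) (by omega)]) | simp_all [pvCell_zero, pvCell_one]


-- the whole outer loop
lemma pvOuter_fold {N K : Int} (hN : 0 ≤ N) (hK : 1 ≤ K)
    (hD : ¬ (N = 2 ∧ 2 ≤ K)) :
    ∀ M : Nat, (M:Int) ≤ N + 1 →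
    (PySem.List.pyRange 0 (M:Int)).foldl (pvOuter N K)
        (pvGrid (N+1).toNat (K+1).toNat (pvDone N 0))
      = pvGrid (N+1).toNat (K+1).toNat (pvDone N M) := by
  intro M
  induction M with
  | zero => intro _; simp
  | succ k ih =>
    intro hk
    push_cast at hk ⊢
    rw [PySem.List.pyRange_one_succ_right (by omega), List.foldl_append,
        ih (by omega)]
    simp only [List.foldl_cons, List.foldl_nil]
    exact pvOuter_step hK (by omega) (by omega) (fun h2 hN hK2 => by omega)

lemma pvBinom_eq_choose {n k : Int} (h0 : 0 ≤ k) (hkn : k ≤ n) :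
    pvBinom n k = ((n.toNat).choose k.toNat : Int) := by
  unfold pvBinom
  rw [if_neg (by omega)]
  have loop : ∀ c : Nat, (c:Int) ≤ k →
      (PySem.List.pyRange 0 (c:Int)).foldl
        (fun r i => PySem.Int.floordiv (r * (n - i)) (i + 1)) 1
      = ((n.toNat).choose c : Int) := by
    intro c
    induction c with
    | zero => intro _; simp
    | succ d ih =>
      intro hd
      push_cast at hd ⊢
      rw [PySem.List.pyRange_one_succ_right (by omega), List.foldl_append,
          ih (by omega)]
      simp only [List.foldl_cons, List.foldl_nil]
      have hnc : n - (d:Int) = ((n.toNat - d : Nat) : Int) := by omega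
      rw [hnc]
      have hmul : ((n.toNat).choose d : Int) * ((n.toNat - d : Nat) : Int)
          = ((n.toNat).choose (d+1) : Int) * ((d:Int) + 1) := by
        have h := Nat.choose_succ_right_eq n.toNat d
        exact_mod_cast congrArg (Nat.cast : Nat → Int) h.symm
      rw [hmul, PySem.Int.floordiv_eq_ediv_of_pos (by omega),
          Int.mul_ediv_cancel _ (by omega)]
  have := loop k.toNat (by omega)
  rw [show ((k.toNat : Nat) : Int) = k from by omega] at this
  rw [this]

lemma pvGrid_zero (N : Int) (rows cols : Nat) :
    Array.replicate rows (Array.replicate cols (0:Int)) = pvGrid rows cols (pvDone N 0) := by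
  unfold pvGrid pvDone
  apply Array.ext
  · simp
  · intro a ha1 ha2
    simp only [Array.size_replicate] at ha1
    simp only [Array.getElem_replicate, Array.getElem_map, Array.getElem_range]
    apply Array.ext
    · simp
    · intro b hb1 hb2
      simp only [Array.size_replicate] at hb1
      simp only [Array.getElem_replicate, Array.getElem_map, Array.getElem_range]
      rw [if_neg (by omega)]

lemma pvBinom_of_lt {n k : Int} (h : n < k) : pvBinom n k = 0 := by
  unfold pvBinom
  rw [if_pos (Or.inr h)]

lemma solution_closed {N K : Int} (hN : 0 ≤ N) (hK : 1 ≤ K) (hD : ¬ (N = 2 ∧ 2 ≤ K)) :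
    solution N K = pvCell N N.toNat K.toNat := by
  unfold solution
  simp only []
  rw [pvGrid_zero N]
  have hfold := pvOuter_fold hN hK hD (N+1).toNat (by omega)
  rw [show (((N+1).toNat : Nat) : Int) = N + 1 from by omega] at hfold
  rw [hfold]
  rw [pvGet2_grid (by omega) (by omega) (by omega) (by omega)]
  unfold pvDone
  rw [if_pos (by omega)]

-- wraparound analysis for N = 2 (the D_solution region): row 2 reads itself through dp[-1]
def pvWMid (jd : Nat) (a b : Nat) : Int :=
  if a < 2 then pvCell 2 a b
  else if b = 0 then 1 else if b = 1 then 2 else if b < jd then 2 else 0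

lemma pvGet2_grid_neg1 {cols : Nat} {f : Nat → Nat → Int} {j : Int}
    (hj0 : 0 ≤ j) (hj : j < cols) :
    pvGet2 (pvGrid 3 cols f) (-1) j = f 2 j.toNat := by
  have hrow : pvAGet (pvGrid 3 cols f) (-1) = some ((Array.range cols).map (f 2)) := by
    unfold pvAGet pvGrid
    simp only []
    rw [if_pos (by norm_num : (-1:Int) < 0)]
    simp only [Array.size_map, Array.size_range]
    rw [if_pos (by norm_num : (0:Int) ≤ -1 + (3:Nat))]
    rw [show ((-1 + (3:Nat) : Int)).toNat = 2 from rfl]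
    have hsz : 2 < ((Array.range 3).map
        (fun a => (Array.range cols).map (f a))).size := by
      simp only [Array.size_map, Array.size_range]; omega
    rw [Array.getElem?_eq_getElem hsz, Array.getElem_map, Array.getElem_range]
  unfold pvGet2
  rw [hrow, Option.bind_some, pvAGet_row hj0 hj]
  rfl

lemma pvWrap_step {K : Int} {j : Nat} (hj : 2 ≤ j) (hjK : (j:Int) ≤ K) :
    pvInner 2 2 (pvGrid 3 (K+1).toNat (pvWMid j)) (j:Int)
      = pvGrid 3 (K+1).toNat (pvWMid (j+1)) := by
  have hcols : j < (K+1).toNat := by omega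
  unfold pvInner
  simp only []
  rw [if_pos trivial]
  rw [show (2:Int) - 3 = -1 from by norm_num]
  rw [pvGet2_grid_neg1 (by omega) (by omega)]
  rw [show (2:Int) - 1 = 1 from by norm_num]
  rw [pvGet2_grid (by omega) (by omega) (by omega) (by omega)]
  have hr1 : pvWMid j 2 ((j:Int) - 1).toNat = 2 := by
    unfold pvWMid
    rw [if_neg (by omega), if_neg (by omega)]
    by_cases h : ((j:Int) - 1).toNat = 1
    · rw [if_pos h]
    · rw [if_neg h, if_pos (by omega)]
  have hr2 : pvWMid j (1:Int).toNat ((j:Int)).toNat = 0 := by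
    rw [show (1:Int).toNat = 1 from rfl, Int.toNat_natCast]
    unfold pvWMid
    rw [if_pos (by omega)]
    exact pvCell_small (by omega) hj
  rw [hr1, hr2]
  rw [show (2:Int).toNat = 2 from rfl, Int.toNat_natCast]
  rw [pvSet2_grid _ (by omega) hcols]
  rw [pvGet2_grid (by omega) (by omega) (by omega) (by omega)]
  rw [show (2:Int).toNat = 2 from rfl, Int.toNat_natCast]
  rw [if_pos ⟨rfl, rfl⟩]
  rw [pvSet2_grid _ (by omega) hcols]
  apply pvGrid_congr
  intro a ha b hb
  by_cases hab : a = 2 ∧ b = j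
  · rw [if_pos hab, hab.1, hab.2]
    rw [show PySem.Int.mod (2 + 0) 1000000003 = 2 from by decide]
    unfold pvWMid
    rw [if_neg (by omega), if_neg (by omega), if_neg (by omega), if_pos (by omega)]
  · rw [if_neg hab]
    unfold pvWMid
    split_ifs <;> first | rfl | omega
lemma pvWrap_fold {K : Int} : ∀ n : Nat, (2 + n : Int) ≤ K + 1 →
    (PySem.List.pyRange 2 (2 + n)).foldl (pvInner 2 2) (pvGrid 3 (K+1).toNat (pvWMid 2))
      = pvGrid 3 (K+1).toNat (pvWMid (2 + n)) := by
  intro n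
  induction n with
  | zero => intro _; simp
  | succ k ih =>
    intro hk
    push_cast at hk ⊢
    rw [show (2 + ((k:Int) + 1)) = (2 + (k:Int)) + 1 from by ring,
        PySem.List.pyRange_one_succ_right (by omega), List.foldl_append,
        ih (by omega)]
    have hstep := pvWrap_step (K := K) (j := 2 + k) (by omega) (by push_cast; omega)
    rw [show ((2 + k : Nat) : Int) = 2 + (k:Int) from by push_cast; ring] at hstep
    simp only [List.foldl_cons, List.foldl_nil]
    rw [hstep]
    rfl

-- ===== VERDICT (by name: the statement is the Claim_ definition above) =====
theorem solution_spec : Claim_unchanged_solution := by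
  intro N K _ hPre
  intro hD
  unfold D_solution at hD
  rcases hPre with ⟨hN, hK⟩
  rw [solution_closed hN hK hD]
  unfold solution_alt
  by_cases hK1 : K = 1
  · subst hK1
    rw [if_pos rfl, show (1:Int).toNat = 1 from rfl, pvCell_one]
    omega
  · rw [if_neg hK1]
    have hK2 : 2 ≤ K := by omega
    rw [PySem.Int.mod_eq_emod_of_pos (by norm_num)]
    by_cases hN2 : N < 2
    · rw [pvCell_small (by omega) (by omega), pvBinom_of_lt (by omega),
          pvBinom_of_lt (by omega)]
      norm_num
    · have hN3 : 3 ≤ N := by omega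
      have hc : pvCell N N.toNat K.toNat
          = (pvLin (N.toNat-3) (K.toNat-1) + pvLin (N.toNat-1) K.toNat) % 1000000003 := by
        unfold pvCell
        rw [if_neg (by omega), if_neg (by omega), if_neg (by omega), if_pos (by omega)]
      rw [hc]
      have ht1 : pvBinom (N - K) K = pvLin (N.toNat-1) K.toNat := by
        unfold pvLin
        by_cases hcge : K ≤ N - K
        · rw [pvBinom_eq_choose (by omega) hcge,
              show (N-K).toNat = N.toNat - 1 + 1 - K.toNat from by omega]
        · rw [pvBinom_of_lt (by omega),
              Nat.choose_eq_zero_of_lt (by omega)]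
          rfl
      have ht2 : pvBinom (N - K - 1) (K - 1) = pvLin (N.toNat-3) (K.toNat-1) := by
        unfold pvLin
        by_cases hcge : K - 1 ≤ N - K - 1
        · rw [pvBinom_eq_choose (by omega) hcge,
              show (N-K-1).toNat = N.toNat - 3 + 1 - (K.toNat - 1) from by omega,
              show (K-1).toNat = K.toNat - 1 from by omega]
        · rw [pvBinom_of_lt (by omega),
              Nat.choose_eq_zero_of_lt (by omega)]
          rfl
      rw [ht1, ht2]
      ring_nf
theorem solution_changed : Claim_changed_solution := by unfold Claim_changed_solution; decide
theorem solution_tight : Claim_exact_solution := by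
  intro N K _ hPre hD
  unfold Pre_solution at hPre
  unfold D_solution at hD
  obtain ⟨hN2, hK2⟩ := hD
  subst hN2
  have halt : solution_alt 2 K = 0 := by
    unfold solution_alt
    rw [if_neg (by omega), pvBinom_of_lt (by omega), pvBinom_of_lt (by omega),
        PySem.Int.mod_eq_emod_of_pos (by norm_num)]
    norm_num
  rw [halt]
  have hsol : solution 2 K = 2 := by
    unfold solution
    simp only []
    rw [show ((2:Int) + 1).toNat = 3 from rfl]
    rw [pvGrid_zero 2]
    rw [show PySem.List.pyRange 0 ((2:Int)+1) = [0, 1, 2] from by decide]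
    simp only [List.foldl_cons, List.foldl_nil]
    have hrows : ((2:Int) + 1).toNat = 3 := rfl
    have h0 := pvOuter_step (N := 2) (K := K) (m := 0) (by omega) (by omega) (by omega)
      (fun h _ _ => by omega)
    have h1 := pvOuter_step (N := 2) (K := K) (m := 1) (by omega) (by omega) (by omega)
      (fun h _ _ => by omega)
    rw [hrows] at h0 h1
    rw [show ((0:Nat):Int) = 0 from rfl] at h0
    rw [show ((1:Nat):Int) = 1 from rfl] at h1
    rw [h0, h1]
    -- the i = 2 = N row
    unfold pvOuter
    simp only []
    rw [if_pos (show (2:Int) ≤ 2 from le_refl _)]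
    rw [show (2:Int).toNat = 2 from rfl]
    rw [pvSet2_grid _ (by omega) (by omega), pvSet2_grid _ (by omega) (by omega)]
    have hmid : pvGrid 3 (K+1).toNat (fun a b => if a = 2 ∧ b = 1 then ((2:Int))
          else if a = 2 ∧ b = 0 then 1 else pvDone 2 2 a b)
        = pvGrid 3 (K+1).toNat (pvWMid 2) := by
      apply pvGrid_congr
      intro a ha b hb
      unfold pvWMid pvDone
      split_ifs <;> first | rfl | omega
    rw [hmid]
    have hw := pvWrap_fold (K := K) (K-1).toNat (by omega)
    rw [show (2 + (((K-1).toNat : Nat) : Int)) = K + 1 from by omega] at hw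
    rw [hw, show 2 + (K-1).toNat = (K+1).toNat from by omega]
    rw [pvGet2_grid (by omega) (by omega) (by omega) (by omega)]
    unfold pvWMid
    rw [if_neg (by omega), if_neg (by omega), if_neg (by omega), if_pos (by omega)]
  rw [hsol]
  decide
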